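-- pv_equiv track=rewrite | github.com/bhumikamittal7/NTT | main/direct.py | negacycNTT
-- ===== SOURCE A (Python) =====
-- def negacycNTT(f, q, psi, n):
--     ntt = []
--     for j in range(n):
--         ntt.append(0)
--         for i in range(n):
--             ntt[j] += f[i]*(psi**((2*i*j)+1))
--         ntt[j] = ntt[j]%q
--     return ntt
-- ===== SOURCE B (Python) =====
-- def negacycNTT(f, q, psi, n):
--     if n <= 0:
--         return []
--     p = psi % q            # psi mod q
--     w = (psi * psi) % q    # psi^2 mod q
--     x = 1 % q              # w**j mod q, updated incrementally
--     coeffs = list(reversed(f[:n]))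
--     out = []
--     for _j in range(n):
--         acc = 0
--         for c in coeffs:   # Horner: acc = sum_i f[i] * x**i  (mod q)
--             acc = (acc * x + c) % q
--         out.append((acc * p) % q)
--         x = (x * w) % q
--     return out
-- ===== Notes on version B (the rewrite author's own statement) =====
-- stated objective: faster
-- what changed: B replaces per-term big-integer exponentiation psi**(2*i*j+1) by fully modular arithmetic: it reduces everything mod q, keeps an incrementally updated twiddle x = psi^(2j) mod q, and evaluates each row as a Horner scheme over the reversed coefficient list, so every operand stays bounded by |q|.
import Mathlib
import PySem

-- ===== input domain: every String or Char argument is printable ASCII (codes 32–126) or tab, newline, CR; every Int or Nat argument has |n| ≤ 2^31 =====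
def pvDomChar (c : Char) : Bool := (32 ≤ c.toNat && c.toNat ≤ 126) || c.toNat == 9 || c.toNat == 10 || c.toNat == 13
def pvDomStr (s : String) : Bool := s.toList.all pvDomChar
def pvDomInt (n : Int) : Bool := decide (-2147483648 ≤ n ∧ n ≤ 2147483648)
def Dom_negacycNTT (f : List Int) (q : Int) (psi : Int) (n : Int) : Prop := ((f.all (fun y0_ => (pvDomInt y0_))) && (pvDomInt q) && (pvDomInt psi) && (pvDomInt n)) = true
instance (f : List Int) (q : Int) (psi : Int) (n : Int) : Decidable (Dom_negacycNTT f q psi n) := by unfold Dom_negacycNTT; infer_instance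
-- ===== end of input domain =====

-- B keeps every operand reduced mod q (incremental twiddle + Horner rows) instead of A's
-- per-term big-integer pow; proved to return A's exact value wherever A returns.

-- ===== PORT A =====
def negacycNTT (f : List Int) (q : Int) (psi : Int) (n : Int) : List Int :=
  (PySem.List.pyRange 0 n 1).foldl
    (fun ntt j =>
      ntt ++ [PySem.Int.mod
        ((PySem.List.pyRange 0 n 1).foldl
          (fun s i => s + PySem.List.pyGetD f i 0 * psi ^ (2 * i * j + 1).toNat) 0) q])
    []

-- ===== PORT B =====
def negacycNTT_alt (f : List Int) (q : Int) (psi : Int) (n : Int) : List Int :=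
  if n ≤ 0 then []
  else
    let p := PySem.Int.mod psi q
    let w := PySem.Int.mod (psi * psi) q
    let coeffs := (PySem.List.slice f none (some n)).reverse
    ((PySem.List.pyRange 0 n 1).foldl
      (fun (st : Int × List Int) _j =>
        (PySem.Int.mod (st.1 * w) q,
         st.2 ++ [PySem.Int.mod
           ((coeffs.foldl (fun a c => PySem.Int.mod (a * st.1 + c) q) 0) * p) q]))
      (PySem.Int.mod 1 q, [])).2

-- ===== PRECONDITION & SPEC =====
-- Pre_ excludes exactly the inputs where Python A raises: IndexError when 0 < n and n > len(f),
-- ZeroDivisionError when 0 < n and q = 0. A returns normally everywhere else.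
def Pre_negacycNTT (f : List Int) (q : Int) (psi : Int) (n : Int) : Prop :=
  0 < n → (n ≤ (f.length : Int) ∧ q ≠ 0)
instance (f : List Int) (q : Int) (psi : Int) (n : Int) : Decidable (Pre_negacycNTT f q psi n) := by
  unfold Pre_negacycNTT; infer_instance

def pvWitness_negacycNTT : List Int × Int × Int × Int := ([1, 2], 5, 3, 2)

def Spec_negacycNTT (f : List Int) (q : Int) (psi : Int) (n : Int) (out : List Int) : Prop := out = negacycNTT_alt f q psi n
instance (f : List Int) (q : Int) (psi : Int) (n : Int) (out : List Int) : Decidable (Spec_negacycNTT f q psi n out) := by unfold Spec_negacycNTT; infer_instance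

-- ===== CLAIM (what is proved, stated in full; the proofs are below) =====
def Claim_equal_negacycNTT : Prop := ∀ (f : List Int) (q : Int) (psi : Int) (n : Int), Dom_negacycNTT f q psi n → Pre_negacycNTT f q psi n → Spec_negacycNTT f q psi n (negacycNTT f q psi n)

-- ===== LEMMAS AND PROOFS =====

-- Python mod is a representative of the emod class
theorem pymod_emod (a q : Int) : (PySem.Int.mod a q) % q = a % q := by
  have h := PySem.Int.floordiv_mul_add_mod a q
  have h2 : PySem.Int.mod a q = a - PySem.Int.floordiv a q * q := by omega
  rw [h2, Int.sub_mul_emod_self_right]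

-- equal emod residues give equal Python mods
theorem pymod_congr (a b q : Int) (h : a % q = b % q) :
    PySem.Int.mod a q = PySem.Int.mod b q := by
  have hm : Int.ModEq q (PySem.Int.mod a q) (PySem.Int.mod b q) := by
    unfold Int.ModEq; rw [pymod_emod, pymod_emod]; exact h
  have hd := Int.ModEq.dvd hm
  rcases lt_trichotomy q 0 with hq | rfl | hq
  · have hb := PySem.Int.mod_neg_bounds (a := a) hq
    have hb' := PySem.Int.mod_neg_bounds (a := b) hq
    have := Int.eq_zero_of_abs_lt_dvd (Int.neg_dvd.mpr hd) (by rw [abs_lt]; omega)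
    omega
  · have : a = b := by simpa using h
    rw [this]
  · have hb := PySem.Int.mod_nonneg (a := a) hq
    have hb2 := PySem.Int.mod_lt (a := a) hq
    have hb' := PySem.Int.mod_nonneg (a := b) hq
    have hb2' := PySem.Int.mod_lt (a := b) hq
    have := Int.eq_zero_of_abs_lt_dvd hd (by rw [abs_lt]; omega)
    omega

-- exact integer Horner value of a coefficient list (lowest coefficient first)
def polyAt (l : List Int) (x : Int) : Int := l.foldr (fun c a => a * x + c) 0

-- B's reduced Horner loop (over the reversed list) as a foldr
def hornerM (q x : Int) (l : List Int) : Int :=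
  l.foldr (fun c a => PySem.Int.mod (a * x + c) q) 0

theorem hornerM_emod (q x : Int) (l : List Int) :
    hornerM q x l % q = polyAt l x % q := by
  induction l with
  | nil => rfl
  | cons c l ih =>
    show PySem.Int.mod (hornerM q x l * x + c) q % q = (polyAt l x * x + c) % q
    rw [pymod_emod]
    exact (Int.ModEq.add_right c (Int.ModEq.mul_right x ih))

theorem polyAt_congr (q x y : Int) (l : List Int) (h : x % q = y % q) :
    polyAt l x % q = polyAt l y % q := by
  induction l with
  | nil => rfl
  | cons c l ih =>
    show (polyAt l x * x + c) % q = (polyAt l y * y + c) % q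
    exact (Int.ModEq.add_right c (Int.ModEq.mul ih h))

-- foldl-with-added-term is the sum of a map
theorem foldl_add_sum (G : Nat → Int) (l : List Nat) (init : Int) :
    l.foldl (fun s k => s + G k) init = init + (l.map G).sum := by
  induction l generalizing init with
  | nil => simp
  | cons a l ih => simp [List.foldl_cons, ih, add_assoc]

-- polyAt as an indexed power sum
theorem polyAt_eq_sum (g : List Int) (y : Int) :
    ((List.range g.length).map (fun k => g.getD k 0 * y ^ k)).sum = polyAt g y := by
  induction g with
  | nil => simp [polyAt]
  | cons c g ih =>
    rw [List.length_cons, List.range_succ_eq_map, List.map_cons, List.sum_cons, List.map_map]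
    have h2 : (List.range g.length).map ((fun k => (c :: g).getD k 0 * y ^ k) ∘ (· + 1))
        = (List.range g.length).map (fun k => g.getD k 0 * y ^ k * y) :=
      List.map_congr_left fun k _ => by simp [Function.comp, pow_succ]; ring
    rw [h2, List.sum_map_mul_right, ih]
    simp [polyAt]; ring

-- A's inner sum is psi * polyAt at psi^(2j)
theorem sumA_eq (g : List Int) (psi : Int) (j : Nat) :
    (List.range g.length).foldl (fun s k => s + g.getD k 0 * psi ^ (2 * k * j + 1)) 0
      = polyAt g (psi ^ (2 * j)) * psi := by
  rw [foldl_add_sum, zero_add, ← polyAt_eq_sum, ← List.sum_map_mul_right]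
  refine congrArg List.sum (List.map_congr_left fun k _ => ?_)
  rw [show 2 * k * j + 1 = 2 * j * k + 1 from by ring, pow_succ, ← pow_mul]
  ring

theorem foldl_const_iterate {α β : Type} (F : β → β) (l : List α) (init : β) :
    l.foldl (fun st _ => F st) init = F^[l.length] init := by
  induction l generalizing init with
  | nil => rfl
  | cons a l ih => simpa [Function.iterate_succ_apply] using ih (F init)

-- invariant of B's loop: after m steps the twiddle is psi^(2m) mod q and the
-- output rows are the reduced Horner rows
theorem B_iter (q psi : Int) (g : List Int) (m : Nat) :
    (fun (st : Int × List Int) =>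
        (PySem.Int.mod (st.1 * PySem.Int.mod (psi * psi) q) q,
         st.2 ++ [PySem.Int.mod ((hornerM q st.1 g) * PySem.Int.mod psi q) q]))^[m]
      (PySem.Int.mod 1 q, [])
    = (PySem.Int.mod (psi ^ (2 * m)) q,
       (List.range m).map (fun k =>
         PySem.Int.mod ((hornerM q (PySem.Int.mod (psi ^ (2 * k)) q) g) * PySem.Int.mod psi q) q)) := by
  induction m with
  | zero => simp
  | succ m ih =>
    rw [Function.iterate_succ_apply', ih]
    refine Prod.ext ?_ ?_
    · show PySem.Int.mod (PySem.Int.mod (psi ^ (2 * m)) q * PySem.Int.mod (psi * psi) q) q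
        = PySem.Int.mod (psi ^ (2 * (m + 1))) q
      apply pymod_congr
      rw [Int.mul_emod, pymod_emod, pymod_emod, ← Int.mul_emod]
      congr 1
      ring
    · simp [List.range_succ]

theorem negacycNTT_spec : Claim_equal_negacycNTT := by
  intro f q psi n _hd hpre
  unfold Spec_negacycNTT negacycNTT negacycNTT_alt
  by_cases hn : n ≤ 0
  · rw [if_pos hn, PySem.List.pyRange_one_eq_nil hn]
    rfl
  · have hn0 : 0 < n := by omega
    obtain ⟨hlen, _hq⟩ := hpre hn0
    rw [if_neg hn]
    show _ = (_ : Int × List Int).2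
    have hfun : ∀ x : Int,
        ((PySem.List.slice f none (some n)).reverse).foldl
          (fun a c => PySem.Int.mod (a * x + c) q) 0
        = hornerM q x (PySem.List.slice f none (some n)) := fun x => by
      rw [List.foldl_reverse]; rfl
    simp only [hfun]
    rw [foldl_const_iterate, PySem.List.length_pyRange_one, B_iter q psi]
    rw [PySem.List.foldl_append_singleton_eq_map, PySem.List.pyRange_one]
    simp only [zero_add, List.map_map, Int.sub_zero]
    simp only [PySem.List.slice_to f (le_of_lt hn0), List.nil_append]
    refine List.map_congr_left fun j hj => ?_
    simp only [Function.comp_apply, List.foldl_map, PySem.List.pyGetD_natCast]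
    have hstep : (List.range n.toNat).foldl
        (fun s (i : Nat) => s + f.getD i 0 * psi ^ (2 * (i : Int) * (j : Int) + 1).toNat) 0
        = (List.range n.toNat).foldl
        (fun s (i : Nat) => s + (f.take n.toNat).getD i 0 * psi ^ (2 * i * j + 1)) 0 := by
      refine PySem.List.foldl_congr_mem _ _ _ _ fun acc i hi => ?_
      have hiN : i < n.toNat := List.mem_range.mp hi
      have hexp : ((2 * (i : Int) * (j : Int) + 1)).toNat = 2 * i * j + 1 := by
        rw [show (2 * (i : Int) * (j : Int) + 1) = ((2 * i * j + 1 : Nat) : Int) by push_cast; ring]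
        exact Int.toNat_natCast _
      have hget : f.getD i 0 = (f.take n.toNat).getD i 0 := by
        rw [List.getD_eq_getElem?_getD, List.getD_eq_getElem?_getD, List.getElem?_take_of_lt hiN]
      rw [hexp, hget]
    rw [hstep]
    have hglen : (f.take n.toNat).length = n.toNat := by
      rw [List.length_take]; omega
    have hsum := sumA_eq (f.take n.toNat) psi j
    rw [hglen] at hsum
    rw [hsum]
    apply pymod_congr
    symm
    rw [Int.mul_emod, hornerM_emod, polyAt_congr q _ (psi ^ (2 * j)) _ (pymod_emod _ _),
      pymod_emod, ← Int.mul_emod]
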